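-- pv_equiv track=rewrite | github.com/YacineAtif/rag-system | simple_qa.py | advanced_deduplicate
-- ===== SOURCE A (Python) =====
-- from typing import List
--
-- def advanced_deduplicate(sentences: List[str]) -> List[str]:
--     """Advanced deduplication that catches semantic duplicates"""
--     if len(sentences) < 2:
--         return sentences
--
--     unique_sentences = []
--
--     for sentence in sentences:
--         is_duplicate = False
--         sentence_clean = sentence.lower().strip()
--
--         # Check against existing sentences
--         for existing in unique_sentences:
--             existing_clean = existing.lower().strip()
--
--             # Method 1: Check for key phrase overlap
--             sentence_phrases = set()
--             existing_phrases = set()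
--
--             # Extract key phrases (3+ word sequences)
--             sentence_words = sentence_clean.split()
--             existing_words = existing_clean.split()
--
--             for i in range(len(sentence_words) - 2):
--                 phrase = ' '.join(sentence_words[i:i+3])
--                 sentence_phrases.add(phrase)
--
--             for i in range(len(existing_words) - 2):
--                 phrase = ' '.join(existing_words[i:i+3])
--                 existing_phrases.add(phrase)
--
--             # Check phrase overlap
--             if sentence_phrases and existing_phrases:
--                 overlap = len(sentence_phrases.intersection(existing_phrases))
--                 total_phrases = len(sentence_phrases.union(existing_phrases))
--                 phrase_similarity = overlap / total_phrases if total_phrases > 0 else 0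
--
--                 if phrase_similarity > 0.5:  # 50% phrase overlap
--                     is_duplicate = True
--                     break
--
--             # Method 2: Check for key concept repetition
--             key_concepts = [
--                 'evidence theory', 'dempster-shafer', 'mathematical framework',
--                 'uncertainty', 'incomplete information', 'basic probability',
--                 'i2connect', 'traffic safety', 'gaze tracking'
--             ]
--
--             sentence_concepts = [c for c in key_concepts if c in sentence_clean]
--             existing_concepts = [c for c in key_concepts if c in existing_clean]
--
--             if (len(sentence_concepts) >= 2 and len(existing_concepts) >= 2 and
--                 len(set(sentence_concepts).intersection(set(existing_concepts))) >= 2):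
--                 # Same concepts being discussed
--                 word_overlap = len(set(sentence_words).intersection(set(existing_words)))
--                 word_similarity = word_overlap / max(len(sentence_words), len(existing_words))
--
--                 if word_similarity > 0.6:  # 60% word overlap with same concepts
--                     is_duplicate = True
--                     break
--
--         if not is_duplicate:
--             unique_sentences.append(sentence)
--
--     return unique_sentences
-- ===== SOURCE B (Python) =====
-- from typing import List
--
-- _KEY_CONCEPTS = [
--     'evidence theory', 'dempster-shafer', 'mathematical framework',
--     'uncertainty', 'incomplete information', 'basic probability',
--     'i2connect', 'traffic safety', 'gaze tracking'
-- ]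
--
--
-- def _features(sentence):
--     """(original, words, phrase set, word set, concept set), computed once per sentence."""
--     clean = sentence.lower().strip()
--     words = clean.split()
--     phrases = {' '.join(words[i:i + 3]) for i in range(len(words) - 2)}
--     return sentence, words, phrases, set(words), {c for c in _KEY_CONCEPTS if c in clean}
--
--
-- def _is_dup(cand, head):
--     _, words, phrases, word_set, concepts = cand
--     _, hwords, hphrases, hword_set, hconcepts = head
--     if phrases and hphrases and 2 * len(phrases & hphrases) > len(phrases | hphrases):
--         return True
--     return (len(concepts) >= 2 and len(hconcepts) >= 2
--             and len(concepts & hconcepts) >= 2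
--             and 5 * len(word_set & hword_set) > 3 * max(len(words), len(hwords)))
--
--
-- def advanced_deduplicate(sentences: List[str]) -> List[str]:
--     """Sieve-style dedup: repeatedly take the pool's head as kept and filter its
--     duplicates out of the remaining pool, instead of scanning the kept list per candidate."""
--     if len(sentences) < 2:
--         return sentences
--     result = []
--     pool = [_features(s) for s in sentences]
--     while pool:
--         head = pool[0]
--         result.append(head[0])
--         pool = [f for f in pool[1:] if not _is_dup(f, head)]
--     return result
-- ===== Notes on version B (the rewrite author's own statement) =====
-- stated objective: faster
-- what changed: B dedupes sieve-style: it builds the pool of per-sentence feature records once (words, 3-word phrase set, word set, key-concept set), then repeatedly keeps the pool's head and filters that head's duplicates out of the remaining pool, instead of A's per-candidate inner scan over the kept list with a break flag and per-pair re-extraction of features.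
import Mathlib
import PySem

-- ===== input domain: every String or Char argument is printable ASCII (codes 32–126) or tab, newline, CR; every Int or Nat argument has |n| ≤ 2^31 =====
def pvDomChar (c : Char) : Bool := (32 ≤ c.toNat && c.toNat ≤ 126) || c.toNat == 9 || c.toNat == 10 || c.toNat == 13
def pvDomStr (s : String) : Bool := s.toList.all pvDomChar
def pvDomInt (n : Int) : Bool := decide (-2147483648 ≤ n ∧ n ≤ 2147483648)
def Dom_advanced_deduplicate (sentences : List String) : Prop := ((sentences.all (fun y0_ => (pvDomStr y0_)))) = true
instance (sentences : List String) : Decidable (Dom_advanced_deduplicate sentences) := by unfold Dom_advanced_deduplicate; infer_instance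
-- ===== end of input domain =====

-- B deduplicates sieve-style: each kept sentence filters its duplicates out of the remaining
-- pool of precomputed feature records, instead of A's per-candidate scan over the kept list;
-- objective: faster (features extracted once per sentence, measured).


-- ===== PORT A =====
-- key_concepts literal from A
def pvKeyConcepts : List String :=
  ["evidence theory", "dempster-shafer", "mathematical framework",
   "uncertainty", "incomplete information", "basic probability",
   "i2connect", "traffic safety", "gaze tracking"]

-- the inner-loop body of A: does `existing` make `sentence` (given as sentence_clean) a duplicate?
-- float comparisons phrase_similarity > 0.5 and word_similarity > 0.6 are ported as the exact
-- integer tests 2*overlap > total and 5*overlap > 3*max (exact for these operand sizes).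
def pvDupA (sentence_clean existing : String) : Bool :=
  let existing_clean := PySem.Str.strip (PySem.Str.lower existing)
  let sentence_words := PySem.Str.split₀ sentence_clean
  let existing_words := PySem.Str.split₀ existing_clean
  let sentence_phrases :=
    (PySem.List.pyRange 0 ((sentence_words.length : Int) - 2) 1).foldl
      (fun ps i => PySem.Set.add ps
        (PySem.Str.join " " (PySem.List.slice sentence_words (some i) (some (i + 3))))) PySem.Set.empty
  let existing_phrases :=
    (PySem.List.pyRange 0 ((existing_words.length : Int) - 2) 1).foldl
      (fun ps i => PySem.Set.add ps
        (PySem.Str.join " " (PySem.List.slice existing_words (some i) (some (i + 3))))) PySem.Set.empty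
  if !sentence_phrases.isEmpty && !existing_phrases.isEmpty &&
      (let overlap := (PySem.Set.inter sentence_phrases existing_phrases).length
       let total := (PySem.Set.union sentence_phrases existing_phrases).length
       -- phrase_similarity = overlap/total if total > 0 else 0; phrase_similarity > 0.5
       if total > 0 then decide (2 * overlap > total) else false) then
    true
  else
    let sentence_concepts := pvKeyConcepts.filter (fun c => PySem.Str.isIn c sentence_clean)
    let existing_concepts := pvKeyConcepts.filter (fun c => PySem.Str.isIn c existing_clean)
    if sentence_concepts.length ≥ 2 && existing_concepts.length ≥ 2 &&
        (PySem.Set.inter (PySem.Set.ofList sentence_concepts) (PySem.Set.ofList existing_concepts)).length ≥ 2 then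
      let word_overlap := (PySem.Set.inter (PySem.Set.ofList sentence_words) (PySem.Set.ofList existing_words)).length
      -- word_similarity = word_overlap / max(...); word_similarity > 0.6
      decide (5 * word_overlap > 3 * max sentence_words.length existing_words.length)
    else
      false

-- A's inner `for existing in unique_sentences` with break on first duplicate
def pvLoopA (sentence_clean : String) : List String → Bool
  | [] => false
  | existing :: rest => if pvDupA sentence_clean existing then true else pvLoopA sentence_clean rest

def advanced_deduplicate (sentences : List String) : List String :=
  if sentences.length < 2 then sentences
  else
    sentences.foldl
      (fun unique_sentences sentence =>
        let sentence_clean := PySem.Str.strip (PySem.Str.lower sentence)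
        if pvLoopA sentence_clean unique_sentences then unique_sentences
        else unique_sentences ++ [sentence]) []

-- ===== PORT B =====
-- feature record: (original, words, phrase set, word set, concept set)
def pvFeat (sentence : String) :
    String × List String × PySem.Set String × PySem.Set String × PySem.Set String :=
  let clean := PySem.Str.strip (PySem.Str.lower sentence)
  let words := PySem.Str.split₀ clean
  let phrases := PySem.Set.ofList
    ((PySem.List.pyRange 0 ((words.length : Int) - 2) 1).map
      (fun i => PySem.Str.join " " (PySem.List.slice words (some i) (some (i + 3)))))
  (sentence, words, phrases, PySem.Set.ofList words,
   PySem.Set.ofList (pvKeyConcepts.filter (fun c => PySem.Str.isIn c clean)))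

def pvDupB (cand head : String × List String × PySem.Set String × PySem.Set String × PySem.Set String) : Bool :=
  let (_, words, phrases, word_set, concepts) := cand
  let (_, hwords, hphrases, hword_set, hconcepts) := head
  if !phrases.isEmpty && !hphrases.isEmpty &&
      decide (2 * (PySem.Set.inter phrases hphrases).length > (PySem.Set.union phrases hphrases).length) then
    true
  else
    decide (concepts.length ≥ 2 ∧ hconcepts.length ≥ 2 ∧
      (PySem.Set.inter concepts hconcepts).length ≥ 2 ∧
      5 * (PySem.Set.inter word_set hword_set).length > 3 * max words.length hwords.length)

-- the `while pool:` sieve of Source B: take the head as kept, filter its duplicates out of the rest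
def pvGo : List (String × List String × PySem.Set String × PySem.Set String × PySem.Set String) → List String
  | [] => []
  | head :: rest => head.1 :: pvGo (rest.filter (fun f => !pvDupB f head))
termination_by pool => pool.length
decreasing_by
  simp only [List.length_unattach]
  exact Nat.lt_succ_of_le (le_trans (List.length_filter_le _ _) (by simp))

def advanced_deduplicate_alt (sentences : List String) : List String :=
  if sentences.length < 2 then sentences
  else pvGo (sentences.map pvFeat)

-- ===== PRECONDITION & SPEC =====
def Spec_advanced_deduplicate (sentences : List String) (out : List String) : Prop := out = advanced_deduplicate_alt sentences
instance (sentences : List String) (out : List String) : Decidable (Spec_advanced_deduplicate sentences out) := by unfold Spec_advanced_deduplicate; infer_instance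

-- ===== CLAIM (what is proved, stated in full; the proofs are below) =====
def Claim_equal_advanced_deduplicate : Prop := ∀ (sentences : List String), Dom_advanced_deduplicate sentences → Spec_advanced_deduplicate sentences (advanced_deduplicate sentences)

-- ===== LEMMAS AND PROOFS =====

theorem pvGo_nil : pvGo [] = [] := by rw [pvGo]

theorem pvGo_cons (h : String × List String × PySem.Set String × PySem.Set String × PySem.Set String)
    (t : List (String × List String × PySem.Set String × PySem.Set String × PySem.Set String)) :
    pvGo (h :: t) = h.1 :: pvGo (t.filter (fun f => !pvDupB f h)) := by rw [pvGo]

theorem pv_length_add_ge {α : Type} [BEq α] (s : PySem.Set α) (x : α) :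
    s.length ≤ (PySem.Set.add s x).length := by
  unfold PySem.Set.add
  split <;> simp

theorem pv_length_update_ge {α : Type} [BEq α] (t : List α) (s : PySem.Set α) :
    s.length ≤ (PySem.Set.update s t).length := by
  induction t generalizing s with
  | nil => simp [PySem.Set.update]
  | cons x xs ih =>
      rw [PySem.Set.update_cons]
      exact le_trans (pv_length_add_ge s x) (ih _)

-- A's guarded phrase-similarity test equals B's plain integer test (a nonempty set forces total > 0)
theorem pv_m1_eq (sp ep : PySem.Set String) :
    (!sp.isEmpty && !ep.isEmpty &&
      (if 0 < (PySem.Set.union sp ep).length then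
        decide (2 * (PySem.Set.inter sp ep).length > (PySem.Set.union sp ep).length) else false))
    = (!sp.isEmpty && !ep.isEmpty &&
        decide (2 * (PySem.Set.inter sp ep).length > (PySem.Set.union sp ep).length)) := by
  by_cases hspe : sp.isEmpty
  · simp [hspe]
  · have hpos : 0 < (PySem.Set.union sp ep).length := by
      have h1 : 0 < sp.length := by
        cases sp with
        | nil => simp [List.isEmpty] at hspe
        | cons a l => simp
      exact lt_of_lt_of_le h1 (pv_length_update_ge ep sp)
    rw [if_pos hpos]

-- A's nested concept/word test equals B's single conjunction
theorem pv_m2_eq (a b c d : Prop) [Decidable a] [Decidable b] [Decidable c] [Decidable d] :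
    (if decide a && decide b && decide c then decide d else false)
    = decide (a ∧ b ∧ c ∧ d) := by
  by_cases ha : a <;> by_cases hb : b <;> by_cases hc : c <;> simp [ha, hb, hc]

theorem pvDup_eq (s e : String) :
    pvDupA (PySem.Str.strip (PySem.Str.lower s)) e = pvDupB (pvFeat s) (pvFeat e) := by
  have hnodup : ∀ (c : String),
      PySem.Set.ofList (pvKeyConcepts.filter (fun k => PySem.Str.isIn k c))
        = pvKeyConcepts.filter (fun k => PySem.Str.isIn k c) := fun c =>
    PySem.Set.ofList_eq_self_of_nodup _ (List.Nodup.filter _ (by decide))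
  simp only [pvDupA, pvDupB, pvFeat, ← PySem.Set.update_map_eq_foldl_add,
    PySem.Set.update_empty, hnodup, ge_iff_le, pv_m1_eq, pv_m2_eq]

theorem pvLoopA_append (sc : String) (acc : List String) (s : String) :
    pvLoopA sc (acc ++ [s]) = (pvLoopA sc acc || pvDupA sc s) := by
  induction acc with
  | nil => simp [pvLoopA]
  | cons e rest ih =>
      simp only [List.cons_append, pvLoopA]
      by_cases h : pvDupA sc e <;> simp [h, ih]

-- relate A's fold with kept accumulator to B's sieve on the still-alive pool
theorem pvFold_go (l : List String) (acc : List String) :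
    l.foldl
      (fun unique_sentences sentence =>
        let sentence_clean := PySem.Str.strip (PySem.Str.lower sentence)
        if pvLoopA sentence_clean unique_sentences then unique_sentences
        else unique_sentences ++ [sentence]) acc
    = acc ++ pvGo ((l.filter (fun x => !pvLoopA (PySem.Str.strip (PySem.Str.lower x)) acc)).map pvFeat) := by
  induction l generalizing acc with
  | nil => simp [pvGo_nil]
  | cons s l ih =>
      simp only [List.foldl_cons, List.filter_cons]
      by_cases h : pvLoopA (PySem.Str.strip (PySem.Str.lower s)) acc
      · simp only [h, if_pos, Bool.not_true, if_neg, Bool.false_eq_true, not_false_iff]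
        exact ih acc
      · simp only [h, Bool.false_eq_true, if_neg, not_false_iff, Bool.not_false, if_pos,
          List.map_cons, pvGo_cons]
        rw [ih (acc ++ [s])]
        have hlist :
            ((l.filter (fun x => !pvLoopA (PySem.Str.strip (PySem.Str.lower x)) acc)).map
                pvFeat).filter (fun f => !pvDupB f (pvFeat s))
            = (l.filter (fun x =>
                !pvLoopA (PySem.Str.strip (PySem.Str.lower x)) (acc ++ [s]))).map pvFeat := by
          rw [List.filter_map]
          apply congrArg
          rw [List.filter_filter]
          apply List.filter_congr
          intro x _
          simp only [Function.comp_apply, pvLoopA_append, Bool.not_or, ← pvDup_eq]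
          rw [Bool.and_comm]
        rw [hlist, List.append_assoc]
        rfl

-- ===== VERDICT (by name: the statement is the Claim_ definition above) =====
theorem advanced_deduplicate_spec : Claim_equal_advanced_deduplicate := by
  intro sentences _
  unfold Spec_advanced_deduplicate advanced_deduplicate advanced_deduplicate_alt
  by_cases h : sentences.length < 2
  · simp [h]
  · simp only [h, if_neg, not_false_iff]
    rw [pvFold_go sentences []]
    simp [pvLoopA]
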